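-- pv_equiv track=rewrite | github.com/marialitovchenko/Coursera-Programming-on-Python-by-MIPT | 1_DiveIn_Python/Week_6/Server_for_accepting_data/solution.py | remove_duplicate_timestamp
-- ===== SOURCE A (Python) =====
-- def remove_duplicate_timestamp(dictToStore):
--     result = {}
--     for key, values in dictToStore.items():
--         # set to store unique timestamps
--         seen = set()
--         # deduplicate based on timestamps using list comprehension
--         dedupl_values = [(measure, timestamp) for measure, timestamp in values[::-1]
--                          if not (timestamp in seen or seen.add(timestamp))]
--         # order according to timestamp
--         dedupl_values = sorted(dedupl_values, key=lambda tup: tup[1])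
--         result[key] = dedupl_values
--
--     return result
-- ===== SOURCE B (Python) =====
-- def remove_duplicate_timestamp(dictToStore):
--     result = {}
--     for key, values in dictToStore.items():
--         # last occurrence per timestamp wins; dict keeps first-occurrence position
--         last = {}
--         for measure, timestamp in values:
--             last[timestamp] = (measure, timestamp)
--         result[key] = sorted(last.values(), key=lambda tup: tup[1])
--     return result
-- ===== Notes on version B (the rewrite author's own statement) =====
-- stated objective: idiomatic
-- what changed: B drops A's list reversal and the mutating seen-set filter: it builds, per key, a timestamp-keyed dict in one forward pass (later entries overwrite, so the last occurrence per timestamp wins) and sorts its values by timestamp.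
import Mathlib
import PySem

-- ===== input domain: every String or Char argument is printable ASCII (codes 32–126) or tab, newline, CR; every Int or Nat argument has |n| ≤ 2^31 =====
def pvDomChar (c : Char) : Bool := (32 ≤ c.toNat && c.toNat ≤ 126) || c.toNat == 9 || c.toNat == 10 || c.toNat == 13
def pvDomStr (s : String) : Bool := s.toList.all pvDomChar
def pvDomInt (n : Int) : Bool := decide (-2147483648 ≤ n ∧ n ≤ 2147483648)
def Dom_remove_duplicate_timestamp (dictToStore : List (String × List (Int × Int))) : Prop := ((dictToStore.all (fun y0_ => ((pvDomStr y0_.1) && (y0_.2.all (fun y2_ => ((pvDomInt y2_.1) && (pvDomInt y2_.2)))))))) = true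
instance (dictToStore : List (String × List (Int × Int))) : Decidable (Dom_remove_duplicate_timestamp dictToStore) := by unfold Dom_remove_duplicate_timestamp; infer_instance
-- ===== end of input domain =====

-- B replaces A's reversal + mutating seen-set filter by a forward pass building a
-- timestamp-keyed dict (last occurrence overwrites) whose values are then sorted (objective: idiomatic).

-- ===== PORT A =====
-- Hand port of A's set-mutating list comprehension over values[::-1]:
-- 'not (timestamp in seen or seen.add(timestamp))' keeps the pair iff the timestamp is
-- unseen, and then adds it to 'seen'; exact on all inputs.
def pvScanSeen (seen : PySem.Set Int) : List (Int × Int) → List (Int × Int)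
  | [] => []
  | v :: rest =>
      if PySem.Set.contains seen v.2 then pvScanSeen seen rest
      else v :: pvScanSeen (PySem.Set.add seen v.2) rest

def remove_duplicate_timestamp (dictToStore : List (String × List (Int × Int))) : List (String × List (Int × Int)) :=
  (dictToStore.foldl
    (fun (result : PySem.Dict String (List (Int × Int))) kv =>
      -- values[::-1]; slice? with step -1 is never none, .getD [] is unreachable
      let dedupl := pvScanSeen PySem.Set.empty ((PySem.List.slice? kv.2 none none (-1)).getD [])
      result.insert kv.1 (PySem.List.sorted dedupl (fun tup => tup.2) false))
    PySem.Dict.empty).items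

-- ===== PORT B =====
def remove_duplicate_timestamp_alt (dictToStore : List (String × List (Int × Int))) : List (String × List (Int × Int)) :=
  (dictToStore.foldl
    (fun (result : PySem.Dict String (List (Int × Int))) kv =>
      let last := kv.2.foldl (fun (d : PySem.Dict Int (Int × Int)) v => d.insert v.2 v) PySem.Dict.empty
      result.insert kv.1 (PySem.List.sorted last.values (fun tup => tup.2) false))
    PySem.Dict.empty).items

-- ===== PRECONDITION & SPEC =====
def Spec_remove_duplicate_timestamp (dictToStore : List (String × List (Int × Int))) (out : List (String × List (Int × Int))) : Prop := out = remove_duplicate_timestamp_alt dictToStore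
instance (dictToStore : List (String × List (Int × Int))) (out : List (String × List (Int × Int))) : Decidable (Spec_remove_duplicate_timestamp dictToStore out) := by unfold Spec_remove_duplicate_timestamp; infer_instance

-- ===== CLAIM (what is proved, stated in full; the proofs are below) =====
def Claim_equal_remove_duplicate_timestamp : Prop := ∀ (dictToStore : List (String × List (Int × Int))), Dom_remove_duplicate_timestamp dictToStore → Spec_remove_duplicate_timestamp dictToStore (remove_duplicate_timestamp dictToStore)

-- ===== LEMMAS AND PROOFS =====

-- the last element of vs whose timestamp is k
def pvLast (vs : List (Int × Int)) (k : Int) : Option (Int × Int) :=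
  match vs with
  | [] => none
  | v :: rest =>
      match pvLast rest k with
      | some w => some w
      | none => if v.2 = k then some v else none

theorem pvLast_eq_none_iff (vs : List (Int × Int)) (k : Int) :
    pvLast vs k = none ↔ k ∉ vs.map Prod.snd := by
  induction vs with
  | nil => simp [pvLast]
  | cons v rest ih =>
    simp only [pvLast, List.map_cons, List.mem_cons]
    cases h : pvLast rest k with
    | some w =>
      have hk : k ∈ rest.map Prod.snd := by
        by_contra hn; rw [ih.mpr hn] at h; cases h
      simp [hk]
    | none =>
      have hn := ih.mp h
      by_cases hv : v.2 = k
      · simp [hv, hn]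
      · rw [if_neg hv]
        constructor
        · intro _ hc
          rcases hc with hc | hc
          · exact hv hc.symm
          · exact hn hc
        · intro _; rfl

theorem pvScanSeen_append (v : Int × Int) (ys : List (Int × Int)) :
    ∀ seen : PySem.Set Int,
      pvScanSeen seen (ys ++ [v]) =
        pvScanSeen seen ys ++ (if v.2 ∈ seen ∨ v.2 ∈ ys.map Prod.snd then [] else [v]) := by
  induction ys with
  | nil =>
    intro seen
    by_cases h : v.2 ∈ seen <;>
      simp [pvScanSeen, h]
  | cons y rest ih =>
    intro seen
    by_cases hy : y.2 ∈ seen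
    · have hyc : PySem.Set.contains seen y.2 = true := (PySem.Set.contains_iff seen y.2).mpr hy
      have hcond : (v.2 ∈ seen ∨ v.2 ∈ rest.map Prod.snd) ↔
          (v.2 ∈ seen ∨ v.2 ∈ (y :: rest).map Prod.snd) := by
        simp only [List.map_cons, List.mem_cons]
        constructor
        · tauto
        · rintro (h | h | h)
          · exact Or.inl h
          · exact Or.inl (by rw [h]; exact hy)
          · exact Or.inr h
      simp only [List.cons_append, pvScanSeen, hyc, if_true, ih seen]
      rw [if_congr hcond rfl rfl]
    · have hyc : ¬ (PySem.Set.contains seen y.2 = true) :=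
        fun hc => hy ((PySem.Set.contains_iff seen y.2).mp hc)
      have hcond : (v.2 ∈ PySem.Set.add seen y.2 ∨ v.2 ∈ rest.map Prod.snd) ↔
          (v.2 ∈ seen ∨ v.2 ∈ (y :: rest).map Prod.snd) := by
        rw [PySem.Set.mem_add seen y.2 v.2]
        simp only [List.map_cons, List.mem_cons]
        tauto
      simp only [List.cons_append, pvScanSeen, if_neg hyc, ih (PySem.Set.add seen y.2)]
      rw [if_congr hcond rfl rfl]

-- A's deduplicated list: scan of the reverse with an empty seen set
def pvFA (vs : List (Int × Int)) : List (Int × Int) := pvScanSeen PySem.Set.empty vs.reverse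

theorem pvFA_cons (v : Int × Int) (vs : List (Int × Int)) :
    pvFA (v :: vs) = pvFA vs ++ (if v.2 ∈ vs.map Prod.snd then [] else [v]) := by
  simp only [pvFA, List.reverse_cons, pvScanSeen_append]
  have : (v.2 ∈ PySem.Set.empty ∨ v.2 ∈ vs.reverse.map Prod.snd) ↔ v.2 ∈ vs.map Prod.snd := by
    simp [PySem.Set.empty]
  by_cases h : v.2 ∈ vs.map Prod.snd
  · rw [if_pos (this.mpr h), if_pos h]
  · rw [if_neg (fun hc => h (this.mp hc)), if_neg h]

theorem mem_pvFA (vs : List (Int × Int)) (x : Int × Int) :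
    x ∈ pvFA vs ↔ pvLast vs x.2 = some x := by
  induction vs with
  | nil => simp [pvFA, pvScanSeen, pvLast]
  | cons v rest ih =>
    rw [pvFA_cons]
    simp only [List.mem_append, ih, pvLast]
    cases h : pvLast rest x.2 with
    | some w =>
      have hk : x.2 ∈ rest.map Prod.snd := by
        by_contra hn; rw [(pvLast_eq_none_iff rest x.2).mpr hn] at h; cases h
      by_cases hv : v.2 ∈ rest.map Prod.snd <;> simp [hv, h]
      intro hx; subst hx; exact absurd hk hv
    | none =>
      have hk : x.2 ∉ rest.map Prod.snd := (pvLast_eq_none_iff rest x.2).mp h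
      by_cases hv : v.2 ∈ rest.map Prod.snd
      · simp only [hv, if_pos, List.not_mem_nil, or_false]
        by_cases hvx : v.2 = x.2
        · simp only [hvx, if_pos]
          constructor
          · intro hx
            exact absurd (hvx ▸ hv) (by rw [show x.2 = x.2 from rfl]; exact hk)
          · intro hx
            have : v = x := Option.some_inj.mp hx
            subst this; exact absurd hv hk
        · simp [hvx]
      · rw [if_neg hv]
        by_cases hvx : v.2 = x.2
        · simp [hvx, eq_comm]
        · rw [if_neg hvx]
          simp only [List.mem_singleton]
          constructor
          · rintro (hx | rfl)
            · exact absurd hx (by simp)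
            · exact absurd rfl hvx
          · intro hx; cases hx

theorem nodup_snd_pvFA (vs : List (Int × Int)) : (pvFA vs |>.map Prod.snd).Nodup := by
  induction vs with
  | nil => simp [pvFA, pvScanSeen]
  | cons v rest ih =>
    rw [pvFA_cons]
    by_cases h : v.2 ∈ rest.map Prod.snd
    · simpa [h] using ih
    · have hsub : v.2 ∉ (pvFA rest).map Prod.snd := by
        intro hc
        rcases List.mem_map.mp hc with ⟨x, hx, hx2⟩
        have := (mem_pvFA rest x).mp hx
        have : x.2 ∈ rest.map Prod.snd := by
          by_contra hn
          rw [(pvLast_eq_none_iff rest x.2).mpr hn] at this; cases this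
        rw [hx2] at this; exact h this
      rw [if_neg h, List.map_append]
      refine (List.nodup_append).mpr ⟨ih, List.nodup_singleton _, ?_⟩
      intro a ha b hb
      simp only [List.map_cons, List.map_nil, List.mem_singleton] at hb
      subst hb
      exact fun he => hsub (he ▸ ha)

-- B's per-key fold
def pvIns (d : PySem.Dict Int (Int × Int)) (v : Int × Int) : PySem.Dict Int (Int × Int) :=
  d.insert v.2 v

theorem get?_fold (vs : List (Int × Int)) :
    ∀ d : PySem.Dict Int (Int × Int), ∀ k : Int,
      (vs.foldl pvIns d).get? k =
        match pvLast vs k with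
        | some w => some w
        | none => d.get? k := by
  induction vs with
  | nil => intro d k; simp [pvLast]
  | cons v rest ih =>
    intro d k
    simp only [List.foldl_cons, ih, pvLast]
    cases pvLast rest k with
    | some w => rfl
    | none =>
      simp only [pvIns, PySem.Dict.get?_insert]
      by_cases h : k = v.2
      · simp [h]
      · simp only [if_neg h]
        rw [if_neg (fun hc : v.2 = k => h hc.symm)]

theorem inv_fold (vs : List (Int × Int)) :
    ∀ d : PySem.Dict Int (Int × Int), (∀ p ∈ d.items, p.2.2 = p.1) →
      ∀ p ∈ (vs.foldl pvIns d).items, p.2.2 = p.1 := by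
  induction vs with
  | nil => intro d hd; exact hd
  | cons v rest ih =>
    intro d hd
    refine ih (pvIns d v) ?_
    intro p hp
    rcases (PySem.Dict.mem_items_insert d v.2 v p).mp hp with rfl | ⟨hmem, _⟩
    · rfl
    · exact hd p hmem

theorem nodup_keys_fold (vs : List (Int × Int)) :
    ∀ d : PySem.Dict Int (Int × Int), d.keys.Nodup → (vs.foldl pvIns d).keys.Nodup := by
  induction vs with
  | nil => intro d hd; exact hd
  | cons v rest ih =>
    intro d hd
    exact ih (pvIns d v) (PySem.Dict.nodup_keys_insert d v.2 v hd)

-- get? = some v → the pair is in items (composition specific to this fold's shape)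
theorem mem_items_of_get? (d : PySem.Dict Int (Int × Int)) (k : Int) (v : Int × Int)
    (h : d.get? k = some v) : (k, v) ∈ d.items := by
  simp only [PySem.Dict.get?, Option.map_eq_some_iff] at h
  rcases h with ⟨p, hp, hpv⟩
  have hmem := List.mem_of_find?_eq_some hp
  have hk := List.find?_some hp
  have : p.1 = k := by simpa using hk
  have : p = (k, v) := Prod.ext this hpv
  rwa [this] at hmem

def pvFB (vs : List (Int × Int)) : List (Int × Int) :=
  (vs.foldl pvIns PySem.Dict.empty).values

theorem mem_pvFB (vs : List (Int × Int)) (x : Int × Int) :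
    x ∈ pvFB vs ↔ pvLast vs x.2 = some x := by
  constructor
  · intro hx
    rcases List.mem_map.mp hx with ⟨p, hp, hpx⟩
    have hinv := inv_fold vs PySem.Dict.empty (by simp [PySem.Dict.empty]) p hp
    have hkeys := nodup_keys_fold vs PySem.Dict.empty (by simp [PySem.Dict.keys, PySem.Dict.empty])
    have hget := PySem.Dict.get?_of_mem_items _ (by rw [show (p.1, p.2) = p from rfl]; exact hp) hkeys
    rw [get?_fold vs PySem.Dict.empty p.1] at hget
    cases h : pvLast vs p.1 with
    | none => rw [h] at hget; simp [PySem.Dict.get?, PySem.Dict.empty] at hget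
    | some w =>
      rw [h] at hget
      have : w = p.2 := Option.some_inj.mp hget
      subst this; subst hpx
      rw [hinv]; exact h
  · intro hx
    have hget : (vs.foldl pvIns PySem.Dict.empty).get? x.2 = some x := by
      rw [get?_fold vs PySem.Dict.empty x.2, hx]
    have := mem_items_of_get? _ _ _ hget
    exact List.mem_map.mpr ⟨(x.2, x), this, rfl⟩

theorem nodup_snd_pvFB (vs : List (Int × Int)) : (pvFB vs |>.map Prod.snd).Nodup := by
  have hinv := inv_fold vs PySem.Dict.empty (by simp [PySem.Dict.empty])
  have hkeys := nodup_keys_fold vs PySem.Dict.empty (by simp [PySem.Dict.keys, PySem.Dict.empty])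
  have heq : (pvFB vs).map Prod.snd = (vs.foldl pvIns PySem.Dict.empty).keys := by
    simp only [pvFB, PySem.Dict.values, List.map_map, PySem.Dict.keys]
    exact List.map_congr_left (fun p hp => hinv p hp)
  rw [heq]; exact hkeys

-- per-key equality of the two deduplicated-and-sorted lists
theorem perKey_eq (vs : List (Int × Int)) :
    PySem.List.sorted (pvFA vs) (fun tup => tup.2) false =
      PySem.List.sorted (pvFB vs) (fun tup => tup.2) false := by
  set zB := PySem.List.sorted (pvFB vs) (fun tup => tup.2) false with hz
  have hperm1 : zB.Perm (pvFB vs) := PySem.List.sorted_perm _ _ _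
  have hnodupB : (pvFB vs).Nodup := (nodup_snd_pvFB vs).of_map
  have hnodupA : (pvFA vs).Nodup := (nodup_snd_pvFA vs).of_map
  have hsndZ : (zB.map Prod.snd).Nodup :=
    ((hperm1.map Prod.snd).nodup_iff).mpr (nodup_snd_pvFB vs)
  have hle : zB.Pairwise (fun a b => a.2 ≤ b.2) := PySem.List.sorted_pairwise _ _
  have hne : zB.Pairwise (fun a b => a.2 ≠ b.2) := List.pairwise_map.mp hsndZ
  have hlt : zB.Pairwise (fun a b => a.2 < b.2) :=
    (hle.and hne).imp (fun h => lt_of_le_of_ne h.1 h.2)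
  have hperm2 : zB.Perm (pvFA vs) := by
    rw [List.perm_ext_iff_of_nodup (hperm1.nodup_iff.mpr hnodupB) hnodupA]
    intro x
    rw [hperm1.mem_iff, mem_pvFB, mem_pvFA]
  exact PySem.List.sorted_eq_of_perm_of_pairwise_lt _ _ _ hperm2 hlt

theorem remove_duplicate_timestamp_eq (dictToStore : List (String × List (Int × Int))) :
    remove_duplicate_timestamp dictToStore = remove_duplicate_timestamp_alt dictToStore := by
  unfold remove_duplicate_timestamp remove_duplicate_timestamp_alt
  congr 1
  apply PySem.List.foldl_congr_mem
  intro acc kv _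
  simp only [PySem.List.slice?_none_none_neg_one, Option.getD_some]
  have := perKey_eq kv.2
  simp only [pvFA, pvFB] at this
  rw [this]
  rfl

-- ===== VERDICT (by name: the statement is the Claim_ definition above) =====
theorem remove_duplicate_timestamp_spec : Claim_equal_remove_duplicate_timestamp := by
  intro dictToStore _
  unfold Spec_remove_duplicate_timestamp
  exact remove_duplicate_timestamp_eq dictToStore
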